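-- pv_equiv track=rewrite | github.com/trongminh108/1000-exercises | Chapter_1/BT26.py | TichUocLe
-- ===== SOURCE A (Python) =====
-- from math import sqrt
--
-- def TichUocLe(n):
--     mul = 1
--     for i in range(1, int(sqrt(n))+1):
--         if n % i == 0:
--             if i % 2 == 1:
--                 mul *= i
--             j = n // i
--             if j != i and j % 2 == 1:
--                 mul *= j
--     return mul
-- ===== SOURCE B (Python) =====
-- from math import isqrt
--
-- def TichUocLe(n):
--     m = n
--     while m > 0 and m % 2 == 0:
--         m //= 2
--     if m <= 0:
--         return 1
--     # the odd divisors of n are exactly the divisors of the odd part m;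
--     # each divisor pair {d, m//d} with d*d < m multiplies to m
--     s = isqrt(m)
--     cnt = sum(1 for i in range(1, s + 1) if i * i < m and m % i == 0)
--     mul = m ** cnt
--     if s * s == m:
--         mul *= s
--     return mul
-- ===== Notes on version B (the rewrite author's own statement) =====
-- stated objective: alternative
-- what changed: B replaces A's sqrt-bounded divisor-pairing scan (multiplying i and n//i with parity tests) by a different algorithm: strip the factor 2^v to get the odd part m, count the divisor pairs of m below sqrt(m), and return the closed form m**pairs times sqrt(m) if m is a square.
import Mathlib
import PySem

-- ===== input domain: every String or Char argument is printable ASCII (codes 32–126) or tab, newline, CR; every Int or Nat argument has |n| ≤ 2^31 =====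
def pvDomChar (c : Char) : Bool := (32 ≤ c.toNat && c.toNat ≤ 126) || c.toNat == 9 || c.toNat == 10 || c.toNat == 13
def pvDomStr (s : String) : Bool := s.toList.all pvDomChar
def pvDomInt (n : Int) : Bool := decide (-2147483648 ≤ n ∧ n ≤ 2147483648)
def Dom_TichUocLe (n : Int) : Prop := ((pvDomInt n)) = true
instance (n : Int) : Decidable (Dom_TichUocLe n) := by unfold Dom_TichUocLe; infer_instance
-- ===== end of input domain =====

-- B replaces A's sqrt-bounded divisor-pairing scan (with parity tests on i and n//i) by a
-- different algorithm: strip the factor 2^v to get the odd part m, count the divisor pairs of m,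
-- and return the closed form m^pairs * (sqrt m if m is a square)  (objective: alternative).

-- ===== PORT A =====
-- int(sqrt(n)): on the admitted domain (0 ≤ n ≤ 2^31) the float sqrt is exact enough that
-- int(sqrt(n)) = Nat.sqrt n (the float error is far below the distance to the nearest integer).
def TichUocLe (n : Int) : Int :=
  (PySem.List.pyRange 1 ((Nat.sqrt n.toNat : Int) + 1) 1).foldl
    (fun mul i =>
      if PySem.Int.mod n i = 0 then
        let mul1 := if PySem.Int.mod i 2 = 1 then mul * i else mul
        let j := PySem.Int.floordiv n i
        if j ≠ i ∧ PySem.Int.mod j 2 = 1 then mul1 * j else mul1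
      else mul) 1

-- ===== PORT B =====
/-- the 'while m > 0 and m % 2 == 0: m //= 2' loop of Source B -/
def pvOddPart (m : Int) : Int :=
  if h : 0 < m ∧ PySem.Int.mod m 2 = 0 then pvOddPart (PySem.Int.floordiv m 2) else m
termination_by m.toNat
decreasing_by
  rcases h with ⟨hm, _⟩
  rw [PySem.Int.floordiv_eq_ediv_of_pos (by norm_num)]
  omega

-- math.isqrt(m) is Nat.sqrt (exact integer square root in both languages);
-- the 'sum(1 for i in range(1, s+1) if …)' generator is ported as filter-then-length.
def TichUocLe_alt (n : Int) : Int :=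
  let m := pvOddPart n
  if m ≤ 0 then 1
  else
    let s : Int := (Nat.sqrt m.toNat : Int)
    let cnt := ((PySem.List.pyRange 1 (s + 1) 1).filter
      (fun i => decide (i * i < m) && decide (PySem.Int.mod m i = 0))).length
    let mul := m ^ cnt
    if s * s = m then mul * s else mul

-- ===== PRECONDITION & SPEC =====
-- Pre_ excludes exactly n < 0, where Python A raises ValueError (math.sqrt of a negative number).
def Pre_TichUocLe (n : Int) : Prop := 0 ≤ n
instance (n : Int) : Decidable (Pre_TichUocLe n) := by unfold Pre_TichUocLe; infer_instance
def pvWitness_TichUocLe : Int := 12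

def Spec_TichUocLe (n : Int) (out : Int) : Prop := out = TichUocLe_alt n
instance (n : Int) (out : Int) : Decidable (Spec_TichUocLe n out) := by unfold Spec_TichUocLe; infer_instance

-- ===== CLAIM (what is proved, stated in full; the proofs are below) =====
def Claim_equal_TichUocLe : Prop := ∀ (n : Int), Dom_TichUocLe n → Pre_TichUocLe n → Spec_TichUocLe n (TichUocLe n)

-- ===== LEMMAS AND PROOFS =====

/-- A multiply-accumulate foldl is the initial value times the product of the mapped list. -/
theorem pv_foldl_mul (g : Int → Int) : ∀ (l : List Int) (a : Int),
    l.foldl (fun m i => m * g i) a = a * (l.map g).prod := by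
  intro l
  induction l with
  | nil => intro a; simp
  | cons x xs ih => intro a; simp [List.foldl, ih, mul_assoc]

/-- The per-element factor contributed by A's loop body. -/
def pvGA (n i : Int) : Int :=
  (if PySem.Int.mod n i = 0 ∧ PySem.Int.mod i 2 = 1 then i else 1) *
  (if PySem.Int.mod n i = 0 ∧ PySem.Int.floordiv n i ≠ i ∧
      PySem.Int.mod (PySem.Int.floordiv n i) 2 = 1 then PySem.Int.floordiv n i else 1)

theorem pv_stepA (n : Int) :
    (fun (mul i : Int) =>
      if PySem.Int.mod n i = 0 then
        let mul1 := if PySem.Int.mod i 2 = 1 then mul * i else mul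
        let j := PySem.Int.floordiv n i
        if j ≠ i ∧ PySem.Int.mod j 2 = 1 then mul1 * j else mul1
      else mul) = fun mul i => mul * pvGA n i := by
  funext mul i
  by_cases h1 : PySem.Int.mod n i = 0 <;>
  by_cases h2 : PySem.Int.mod i 2 = 1 <;>
  by_cases h3 : PySem.Int.floordiv n i ≠ i ∧ PySem.Int.mod (PySem.Int.floordiv n i) 2 = 1 <;>
  simp [pvGA, h1, h3] <;> try ring

theorem pv_Icc_succ (m : ℕ) :
    Finset.Icc (1 : ℤ) ((m : ℤ) + 1) = insert ((m : ℤ) + 1) (Finset.Icc 1 (m : ℤ)) := by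
  ext x; simp [Finset.mem_Icc]; omega

/-- Bridge: the product of g over pyRange 1 (m+1) is the product over Finset.Icc 1 m. -/
theorem pv_prod_pyRange (g : Int → Int) : ∀ (m : ℕ),
    ((PySem.List.pyRange 1 ((m : Int) + 1) 1).map g).prod = ∏ i ∈ Finset.Icc (1 : ℤ) (m : ℤ), g i := by
  intro m
  induction m with
  | zero => simp [PySem.List.pyRange_one_eq_nil]
  | succ k ih =>
      have h1 : ((k : ℤ) + 1 + 1) = ((k + 1 : ℕ) : ℤ) + 1 := by push_cast; ring
      have hr : PySem.List.pyRange 1 ((k : ℤ) + 1 + 1) 1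
          = PySem.List.pyRange 1 ((k : ℤ) + 1) 1 ++ [(k : ℤ) + 1] :=
        PySem.List.pyRange_one_succ_right (by omega)
      have hnotmem : ((k : ℤ) + 1) ∉ Finset.Icc (1 : ℤ) (k : ℤ) := by
        simp [Finset.mem_Icc]
      calc ((PySem.List.pyRange 1 (((k + 1 : ℕ) : ℤ)  + 1) 1).map g).prod
          = ((PySem.List.pyRange 1 ((k : ℤ) + 1) 1).map g).prod * g ((k : ℤ) + 1) := by
            rw [← h1, hr]; simp
        _ = (∏ i ∈ Finset.Icc (1 : ℤ) (k : ℤ), g i) * g ((k : ℤ) + 1) := by rw [ih]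
        _ = ∏ i ∈ Finset.Icc (1 : ℤ) (((k + 1 : ℕ)) : ℤ), g i := by
            push_cast
            rw [pv_Icc_succ k, Finset.prod_insert hnotmem]; ring

/-- Int-level bridge from the pyRange fold products to Finset.Icc products. -/
theorem pv_prod_pyRange_int (g : Int → Int) (b : Int) (hb : 0 ≤ b) :
    ((PySem.List.pyRange 1 (b + 1) 1).map g).prod = ∏ i ∈ Finset.Icc (1 : ℤ) b, g i := by
  have : b = ((b.toNat : ℕ) : ℤ) := (Int.toNat_of_nonneg hb).symm
  rw [this]
  exact pv_prod_pyRange g b.toNat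

/-- Bridge: the length of a filtered pyRange 1 (m+1) is the card of the filtered Finset.Icc 1 m. -/
theorem pv_count_pyRange (p : Int → Bool) : ∀ (m : ℕ),
    ((PySem.List.pyRange 1 ((m : Int) + 1) 1).filter p).length
      = ((Finset.Icc (1 : ℤ) (m : ℤ)).filter (fun i => p i = true)).card := by
  intro m
  induction m with
  | zero => simp [PySem.List.pyRange_one_eq_nil]
  | succ k ih =>
      have h1 : ((k : ℤ) + 1 + 1) = ((k + 1 : ℕ) : ℤ) + 1 := by push_cast; ring
      have hr : PySem.List.pyRange 1 ((k : ℤ) + 1 + 1) 1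
          = PySem.List.pyRange 1 ((k : ℤ) + 1) 1 ++ [(k : ℤ) + 1] :=
        PySem.List.pyRange_one_succ_right (by omega)
      have hnotmem : ((k : ℤ) + 1) ∉ Finset.Icc (1 : ℤ) (k : ℤ) := by
        simp [Finset.mem_Icc]
      have hcast : ((k + 1 : ℕ) : ℤ) = (k : ℤ) + 1 := by push_cast; ring
      rw [hcast, hr, List.filter_append, List.length_append, ih, pv_Icc_succ k,
        Finset.filter_insert]
      by_cases hp : p ((k : ℤ) + 1) = true
      · rw [if_pos hp, Finset.card_insert_of_notMem (fun hmem => hnotmem (Finset.mem_of_mem_filter _ hmem))]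
        simp [hp]
      · rw [if_neg hp]
        simp [List.filter, hp]

theorem pv_count_pyRange_int (p : Int → Bool) (b : Int) (hb : 0 ≤ b) :
    ((PySem.List.pyRange 1 (b + 1) 1).filter p).length
      = ((Finset.Icc (1 : ℤ) b).filter (fun i => p i = true)).card := by
  have : b = ((b.toNat : ℕ) : ℤ) := (Int.toNat_of_nonneg hb).symm
  rw [this]
  exact pv_count_pyRange p b.toNat

/-- Exact division facts for a positive divisor of a positive integer. -/
theorem pv_div_facts (n i : ℤ) (hn : 0 < n) (h1 : 1 ≤ i) (hd : i ∣ n) :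
    1 ≤ n / i ∧ n / i ≤ n ∧ n / i ∣ n ∧ n / (n / i) = i ∧ i * (n / i) = n := by
  obtain ⟨c, hc⟩ := hd
  have hi0 : i ≠ 0 := by omega
  have hq : n / i = c := by rw [hc]; exact Int.mul_ediv_cancel_left c hi0
  have hc1 : 1 ≤ c := by nlinarith
  have hcn : c ≤ n := by nlinarith
  have hq2 : n / c = i := by
    rw [hc, mul_comm]; exact Int.mul_ediv_cancel_left i (by omega)
  exact ⟨by omega, by omega, ⟨i, by rw [hq, hc]; ring⟩, by rw [hq, hq2], by rw [hq]; omega⟩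

/-- Core pairing fact for A: the sqrt-bounded product of pvGA factors is the product
of all odd divisors. Stated for any r with r*r ≤ n < (r+1)*(r+1). -/
theorem pv_core (n r : ℤ) (hn : 0 < n) (hr : 0 ≤ r) (hrl : r * r ≤ n)
    (hru : n < (r + 1) * (r + 1)) :
    (∏ i ∈ Finset.Icc (1 : ℤ) r, pvGA n i)
      = ∏ a ∈ Finset.Icc (1 : ℤ) n with a ∣ n ∧ a % 2 = 1, a := by
  have hA : (∏ i ∈ Finset.Icc (1 : ℤ) r, pvGA n i)
      = ∏ i ∈ Finset.Icc (1 : ℤ) r,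
        ((if i ∣ n ∧ i % 2 = 1 then i else 1) *
         (if i ∣ n ∧ n / i ≠ i ∧ (n / i) % 2 = 1 then n / i else 1)) := by
    refine Finset.prod_congr rfl ?_
    intro i hi
    have h1 : (1 : ℤ) ≤ i := (Finset.mem_Icc.mp hi).1
    have hm : PySem.Int.mod n i = n % i := PySem.Int.mod_eq_emod_of_pos (by omega)
    have hd : PySem.Int.floordiv n i = n / i := PySem.Int.floordiv_eq_ediv_of_pos (by omega)
    simp [pvGA, hm, hd]
  rw [hA, Finset.prod_mul_distrib, ← Finset.prod_filter, ← Finset.prod_filter]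
  -- on [1,r], a divisor's cofactor exceeds r iff it differs from the divisor
  have hkey : ∀ i : ℤ, 1 ≤ i → i ≤ r → i ∣ n → (n / i ≠ i ↔ r < n / i) := by
    intro i h1 h2 hd
    obtain ⟨hq1, hqn, hqd, hqq, hqm⟩ := pv_div_facts n i hn h1 hd
    constructor
    · intro hne
      by_contra hle
      rw [not_lt] at hle
      have e1 : i * (n / i) ≤ i * r := by nlinarith
      have e2 : i * r ≤ r * r := by nlinarith
      have e3 : r * r ≤ i * (n / i) := by nlinarith
      have eir : i * r = r * r := by linarith
      have hir : i = r := by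
        have : (i - r) * r = 0 := by ring_nf; linarith
        rcases mul_eq_zero.mp this with h | h
        · omega
        · omega
      have eic : i * (n / i) = i * r := by linarith
      have : n / i = r := mul_left_cancel₀ (show i ≠ 0 by omega) eic
      omega
    · intro hlt
      omega
  -- large odd divisors have their cofactor in [1, r]
  have hbig : ∀ b : ℤ, 1 ≤ b → b ∣ n → r < b → n / b ≤ r := by
    intro b h1 hd hrb
    obtain ⟨hq1, hqn, hqd, hqq, hqm⟩ := pv_div_facts n b hn h1 hd
    by_contra hgt
    rw [not_le] at hgt
    nlinarith
  -- the paired product equals the product over large odd divisors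
  have hbij : (∏ a ∈ Finset.Icc (1 : ℤ) r with a ∣ n ∧ n / a ≠ a ∧ n / a % 2 = 1, n / a)
      = ∏ a ∈ Finset.Icc (1 : ℤ) n with (a ∣ n ∧ a % 2 = 1) ∧ ¬ a ≤ r, a := by
    refine Finset.prod_nbij' (fun a => n / a) (fun b => n / b) ?_ ?_ ?_ ?_ ?_
    · intro a ha
      simp only [Finset.mem_filter, Finset.mem_Icc] at ha ⊢
      obtain ⟨⟨ha1, har⟩, had, hane, haodd⟩ := ha
      obtain ⟨hq1, hqn, hqd, hqq, hqm⟩ := pv_div_facts n a hn ha1 had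
      have := (hkey a ha1 har had).mp hane
      exact ⟨⟨hq1, hqn⟩, ⟨hqd, haodd⟩, by omega⟩
    · intro b hb
      simp only [Finset.mem_filter, Finset.mem_Icc] at hb ⊢
      obtain ⟨⟨hb1, hbn⟩, ⟨hbd, hbodd⟩, hbr⟩ := hb
      rw [not_le] at hbr
      obtain ⟨hq1, hqn, hqd, hqq, hqm⟩ := pv_div_facts n b hn hb1 hbd
      have hcr : n / b ≤ r := hbig b hb1 hbd hbr
      refine ⟨⟨hq1, hcr⟩, hqd, ?_, by rw [hqq]; exact hbodd⟩
      rw [hqq]; omega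
    · intro a ha
      simp only [Finset.mem_filter, Finset.mem_Icc] at ha
      exact (pv_div_facts n a hn ha.1.1 ha.2.1).2.2.2.1
    · intro b hb
      simp only [Finset.mem_filter, Finset.mem_Icc] at hb
      exact (pv_div_facts n b hn hb.1.1 hb.2.1.1).2.2.2.1
    · intro a _; rfl
  rw [hbij]
  -- small odd divisors: the [1,r] range is the ≤ r part of the full range
  have hsmall : (∏ a ∈ Finset.Icc (1 : ℤ) r with a ∣ n ∧ a % 2 = 1, a)
      = ∏ a ∈ Finset.Icc (1 : ℤ) n with (a ∣ n ∧ a % 2 = 1) ∧ a ≤ r, a := by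
    apply Finset.prod_congr _ (fun _ _ => rfl)
    ext a
    simp only [Finset.mem_filter, Finset.mem_Icc]
    constructor
    · rintro ⟨⟨h1, h2⟩, hd, ho⟩
      have han : a ≤ n := by nlinarith
      exact ⟨⟨h1, han⟩, ⟨hd, ho⟩, h2⟩
    · rintro ⟨⟨h1, _⟩, ⟨hd, ho⟩, h2⟩
      exact ⟨⟨h1, h2⟩, hd, ho⟩
  rw [hsmall]
  have := Finset.prod_filter_mul_prod_filter_not
    ((Finset.Icc (1 : ℤ) n).filter (fun a => a ∣ n ∧ a % 2 = 1)) (fun a => a ≤ r) (fun a => a)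
  rw [Finset.filter_filter, Finset.filter_filter] at this
  exact this

-- facts about the odd part
theorem pv_oddPart_pos : ∀ m : ℤ, 0 < m → 0 < pvOddPart m := by
  intro m
  induction m using pvOddPart.induct with
  | case1 m h ih =>
      intro _
      rw [pvOddPart, dif_pos h]
      refine ih ?_
      rcases h with ⟨hm, he⟩
      rw [PySem.Int.mod_eq_emod_of_pos (by norm_num)] at he
      rw [PySem.Int.floordiv_eq_ediv_of_pos (by norm_num)]
      omega
  | case2 m h =>
      intro hm
      rw [pvOddPart, dif_neg h]
      exact hm

theorem pv_oddPart_le : ∀ m : ℤ, 0 < m → pvOddPart m ≤ m := by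
  intro m
  induction m using pvOddPart.induct with
  | case1 m h ih =>
      intro _
      rw [pvOddPart, dif_pos h]
      rcases h with ⟨hm, he⟩
      rw [PySem.Int.mod_eq_emod_of_pos (by norm_num)] at he
      rw [PySem.Int.floordiv_eq_ediv_of_pos (by norm_num)]
      have h2 : 0 < m / 2 := by omega
      have := ih (by rw [PySem.Int.floordiv_eq_ediv_of_pos (by norm_num)]; omega)
      rw [PySem.Int.floordiv_eq_ediv_of_pos (by norm_num)] at this
      omega
  | case2 m h =>
      intro _
      rw [pvOddPart, dif_neg h]

theorem pv_oddPart_odd : ∀ m : ℤ, 0 < m → pvOddPart m % 2 = 1 := by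
  intro m
  induction m using pvOddPart.induct with
  | case1 m h ih =>
      intro _
      rw [pvOddPart, dif_pos h]
      rcases h with ⟨hm, he⟩
      rw [PySem.Int.mod_eq_emod_of_pos (by norm_num)] at he
      refine ih ?_
      rw [PySem.Int.floordiv_eq_ediv_of_pos (by norm_num)]
      omega
  | case2 m h =>
      intro hm
      rw [pvOddPart, dif_neg h]
      rw [Decidable.not_and_iff_not_or_not] at h
      rcases h with h | h
      · omega
      · rw [PySem.Int.mod_eq_emod_of_pos (by norm_num)] at h
        omega

/-- An odd number divides m iff it divides the odd part of m. -/
theorem pv_oddPart_dvd_iff (d : ℤ) (hd : d % 2 = 1) :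
    ∀ m : ℤ, 0 < m → (d ∣ pvOddPart m ↔ d ∣ m) := by
  intro m
  induction m using pvOddPart.induct with
  | case1 m h ih =>
      intro _
      rw [pvOddPart, dif_pos h]
      rcases h with ⟨hm, he⟩
      rw [PySem.Int.mod_eq_emod_of_pos (by norm_num)] at he
      rw [PySem.Int.floordiv_eq_ediv_of_pos (by norm_num)] at ih ⊢
      have h2 : 0 < m / 2 := by omega
      rw [ih h2]
      have hsplit : m = (m / 2) * 2 := by omega
      constructor
      · intro hdd
        exact hsplit ▸ Dvd.dvd.mul_right hdd 2
      · intro hdd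
        have hco : IsCoprime d (2 : ℤ) := ⟨1, -((d - 1) / 2), by omega⟩
        exact hco.dvd_of_dvd_mul_right (hsplit ▸ hdd)
  | case2 m h =>
      intro _
      rw [pvOddPart, dif_neg h]

/-- sqrt bounds, in ℤ form. -/
theorem pv_sqrt_bounds (m : ℤ) (hm : 0 ≤ m) :
    ((Nat.sqrt m.toNat : ℤ)) * ((Nat.sqrt m.toNat : ℤ)) ≤ m ∧
      m < ((Nat.sqrt m.toNat : ℤ) + 1) * ((Nat.sqrt m.toNat : ℤ) + 1) := by
  have h1 := Nat.sqrt_le m.toNat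
  have h2 := Nat.lt_succ_sqrt m.toNat
  have hcast : ((m.toNat : ℕ) : ℤ) = m := Int.toNat_of_nonneg hm
  constructor
  · calc ((Nat.sqrt m.toNat : ℤ)) * ((Nat.sqrt m.toNat : ℤ))
        = ((Nat.sqrt m.toNat * Nat.sqrt m.toNat : ℕ) : ℤ) := by push_cast; ring
      _ ≤ ((m.toNat : ℕ) : ℤ) := by exact_mod_cast h1
      _ = m := hcast
  · calc m = ((m.toNat : ℕ) : ℤ) := hcast.symm
      _ < ((Nat.succ (Nat.sqrt m.toNat) * Nat.succ (Nat.sqrt m.toNat) : ℕ) : ℤ) := by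
          exact_mod_cast h2
      _ = ((Nat.sqrt m.toNat : ℤ) + 1) * ((Nat.sqrt m.toNat : ℤ) + 1) := by push_cast; ring

/-- Closed form for the product of all divisors of a positive m:
m to the number of divisor pairs, times sqrt m if m is a square. -/
theorem pv_closed (m s : ℤ) (hm : 0 < m) (hs0 : 0 ≤ s) (hsl : s * s ≤ m)
    (hsu : m < (s + 1) * (s + 1)) :
    (∏ a ∈ Finset.Icc (1 : ℤ) m with a ∣ m, a)
      = m ^ (((Finset.Icc (1 : ℤ) s).filter (fun i => i * i < m ∧ i ∣ m)).card)
          * (if s * s = m then s else 1) := by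
  -- split off the small divisors (a*a < m)
  have e1 := Finset.prod_filter_mul_prod_filter_not
    ((Finset.Icc (1 : ℤ) m).filter (fun a => a ∣ m)) (fun a => a * a < m) (fun a => a)
  rw [Finset.filter_filter, Finset.filter_filter] at e1
  -- split the rest into the square root (a*a = m) and the large divisors (m < a*a)
  have e2 := Finset.prod_filter_mul_prod_filter_not
    ((Finset.Icc (1 : ℤ) m).filter (fun a => a ∣ m ∧ ¬ a * a < m)) (fun a => a * a = m)
    (fun a => a)
  rw [Finset.filter_filter, Finset.filter_filter] at e2
  have hlarge : ((Finset.Icc (1 : ℤ) m).filter (fun a => (a ∣ m ∧ ¬ a * a < m) ∧ ¬ a * a = m))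
      = (Finset.Icc (1 : ℤ) m).filter (fun a => a ∣ m ∧ m < a * a) := by
    ext a
    simp only [Finset.mem_filter, Finset.mem_Icc]
    constructor
    · rintro ⟨hb, ⟨hd, hnl⟩, hne⟩
      exact ⟨hb, hd, by omega⟩
    · rintro ⟨hb, hd, hgt⟩
      exact ⟨hb, ⟨hd, by omega⟩, by omega⟩
  rw [hlarge] at e2
  -- the large divisors are the cofactors of the small ones
  have hbij : (∏ a ∈ Finset.Icc (1 : ℤ) m with a ∣ m ∧ m < a * a, a)
      = ∏ a ∈ Finset.Icc (1 : ℤ) m with a ∣ m ∧ a * a < m, m / a := by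
    refine Finset.prod_nbij' (fun a => m / a) (fun b => m / b) ?_ ?_ ?_ ?_ ?_
    · intro a ha
      simp only [Finset.mem_filter, Finset.mem_Icc] at ha ⊢
      obtain ⟨⟨ha1, ham⟩, had, hagt⟩ := ha
      obtain ⟨hq1, hqn, hqd, hqq, hqm⟩ := pv_div_facts m a hm ha1 had
      refine ⟨⟨hq1, hqn⟩, hqd, ?_⟩
      nlinarith
    · intro b hb
      simp only [Finset.mem_filter, Finset.mem_Icc] at hb ⊢
      obtain ⟨⟨hb1, hbm⟩, hbd, hblt⟩ := hb
      obtain ⟨hq1, hqn, hqd, hqq, hqm⟩ := pv_div_facts m b hm hb1 hbd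
      refine ⟨⟨hq1, hqn⟩, hqd, ?_⟩
      nlinarith
    · intro a ha
      simp only [Finset.mem_filter, Finset.mem_Icc] at ha
      exact (pv_div_facts m a hm ha.1.1 ha.2.1).2.2.2.1
    · intro b hb
      simp only [Finset.mem_filter, Finset.mem_Icc] at hb
      exact (pv_div_facts m b hm hb.1.1 hb.2.1).2.2.2.1
    · intro a ha
      simp only [Finset.mem_filter, Finset.mem_Icc] at ha
      exact ((pv_div_facts m a hm ha.1.1 ha.2.1).2.2.2.1).symm
  -- small product times its cofactors is m per pair
  have hpairs : (∏ a ∈ Finset.Icc (1 : ℤ) m with a ∣ m ∧ a * a < m, a)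
        * (∏ a ∈ Finset.Icc (1 : ℤ) m with a ∣ m ∧ a * a < m, m / a)
      = m ^ (((Finset.Icc (1 : ℤ) m).filter (fun a => a ∣ m ∧ a * a < m)).card) := by
    rw [← Finset.prod_mul_distrib]
    rw [Finset.prod_congr rfl (fun a ha => ?_), Finset.prod_const]
    simp only [Finset.mem_filter, Finset.mem_Icc] at ha
    exact (pv_div_facts m a hm ha.1.1 ha.2.1).2.2.2.2
  -- the possible square-root divisor
  have hmid : (∏ a ∈ Finset.Icc (1 : ℤ) m with (a ∣ m ∧ ¬ a * a < m) ∧ a * a = m, a)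
      = if s * s = m then s else 1 := by
    by_cases hsq : s * s = m
    · rw [if_pos hsq]
      have hs1 : 1 ≤ s := by nlinarith
      have : ((Finset.Icc (1 : ℤ) m).filter (fun a => (a ∣ m ∧ ¬ a * a < m) ∧ a * a = m))
          = {s} := by
        ext a
        simp only [Finset.mem_filter, Finset.mem_Icc, Finset.mem_singleton]
        constructor
        · rintro ⟨⟨ha1, ham⟩, _, hasq⟩
          rcases lt_trichotomy a s with h | h | h
          · nlinarith
          · exact h
          · nlinarith
        · intro ha
          rw [ha]
          exact ⟨⟨hs1, by nlinarith⟩, ⟨⟨s, hsq.symm⟩, by omega⟩, hsq⟩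
      rw [this, Finset.prod_singleton]
    · rw [if_neg hsq]
      have : ((Finset.Icc (1 : ℤ) m).filter (fun a => (a ∣ m ∧ ¬ a * a < m) ∧ a * a = m))
          = ∅ := by
        ext a
        simp only [Finset.mem_filter, Finset.mem_Icc, Finset.notMem_empty, iff_false]
        rintro ⟨⟨ha1, ham⟩, _, hasq⟩
        have has : a = s := by
          rcases lt_trichotomy a s with h | h | h
          · nlinarith
          · exact h
          · nlinarith
        exact hsq (by rw [← has]; exact hasq)
      rw [this, Finset.prod_empty]
  -- the counting set over [1,s] is the small-divisor set
  have hcnt : ((Finset.Icc (1 : ℤ) s).filter (fun i => i * i < m ∧ i ∣ m))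
      = (Finset.Icc (1 : ℤ) m).filter (fun a => a ∣ m ∧ a * a < m) := by
    ext a
    simp only [Finset.mem_filter, Finset.mem_Icc]
    constructor
    · rintro ⟨⟨h1, h2⟩, hlt, hd⟩
      exact ⟨⟨h1, by nlinarith⟩, hd, hlt⟩
    · rintro ⟨⟨h1, h2⟩, hd, hlt⟩
      exact ⟨⟨h1, by nlinarith⟩, hlt, hd⟩
  rw [hcnt, ← e1, ← e2, hbij, ← hpairs, ← hmid]
  ring

/-- B's value for positive n is the product of all odd divisors of n. -/
theorem pv_alt_eq (n : ℤ) (hn : 0 < n) :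
    TichUocLe_alt n = ∏ a ∈ Finset.Icc (1 : ℤ) n with a ∣ n ∧ a % 2 = 1, a := by
  have hm : 0 < pvOddPart n := pv_oddPart_pos n hn
  have hodd : pvOddPart n % 2 = 1 := pv_oddPart_odd n hn
  have hle : pvOddPart n ≤ n := pv_oddPart_le n hn
  set m := pvOddPart n with hmdef
  set s : ℤ := (Nat.sqrt m.toNat : ℤ) with hsdef
  simp only [TichUocLe_alt, ← hmdef, ← hsdef]
  rw [if_neg (by omega)]
  obtain ⟨hsl, hsu⟩ := pv_sqrt_bounds m (le_of_lt hm)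
  rw [← hsdef] at hsl hsu
  have hs0 : 0 ≤ s := by rw [hsdef]; exact Int.natCast_nonneg _
  -- the filtered count over the pyRange equals the Finset count
  have hcnt : ((PySem.List.pyRange 1 (s + 1) 1).filter
        (fun i => decide (i * i < m) && decide (PySem.Int.mod m i = 0))).length
      = ((Finset.Icc (1 : ℤ) s).filter (fun i => i * i < m ∧ i ∣ m)).card := by
    rw [pv_count_pyRange_int _ s hs0]
    apply congrArg
    apply Finset.filter_congr
    intro i hi
    have h1 : (1 : ℤ) ≤ i := (Finset.mem_Icc.mp hi).1
    rw [PySem.Int.mod_eq_emod_of_pos (by omega)]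
    constructor
    · intro h
      simp only [Bool.and_eq_true, decide_eq_true_eq] at h
      exact ⟨h.1, by omega⟩
    · intro h
      simp only [Bool.and_eq_true, decide_eq_true_eq]
      obtain ⟨c, hc⟩ := h.2
      exact ⟨h.1, by rw [hc]; simp [Int.mul_emod_right]⟩
  rw [hcnt]
  -- the odd divisors of n are the divisors of the odd part m
  have hset : ((Finset.Icc (1 : ℤ) n).filter (fun a => a ∣ n ∧ a % 2 = 1))
      = (Finset.Icc (1 : ℤ) m).filter (fun a => a ∣ m) := by
    ext a
    simp only [Finset.mem_filter, Finset.mem_Icc]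
    constructor
    · rintro ⟨⟨h1, h2⟩, hd, ho⟩
      have hdm : a ∣ m := (pv_oddPart_dvd_iff a ho n hn).mpr hd
      exact ⟨⟨h1, Int.le_of_dvd hm hdm⟩, hdm⟩
    · rintro ⟨⟨h1, h2⟩, hd⟩
      have ho : a % 2 = 1 := by
        by_contra hbad
        have h2d : (2 : ℤ) ∣ a := by omega
        have : (2 : ℤ) ∣ m := h2d.trans hd
        omega
      exact ⟨⟨h1, by omega⟩, (pv_oddPart_dvd_iff a ho n hn).mp hd, ho⟩
  rw [hset, pv_closed m s hm hs0 hsl hsu]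
  split_ifs <;> ring

-- ===== VERDICT (by name: the statement is the Claim_ definition above) =====
theorem TichUocLe_spec : Claim_equal_TichUocLe := by
  intro n _ hpre
  by_cases hn : n = 0
  · subst hn
    show TichUocLe 0 = TichUocLe_alt 0
    have h0 : pvOddPart 0 = 0 := by rw [pvOddPart]; norm_num
    have hB : TichUocLe_alt 0 = 1 := by simp [TichUocLe_alt, h0]
    have hA : TichUocLe 0 = 1 := by
      unfold TichUocLe
      simp [PySem.List.pyRange_one_eq_nil]
    rw [hA, hB]
  have hn1 : 0 < n := by
    have : (0 : ℤ) ≤ n := hpre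
    omega
  show TichUocLe n = TichUocLe_alt n
  unfold TichUocLe
  rw [pv_stepA, pv_foldl_mul, one_mul,
    pv_prod_pyRange_int (pvGA n) _ (Int.natCast_nonneg _)]
  obtain ⟨hsl, hsu⟩ := pv_sqrt_bounds n (le_of_lt hn1)
  rw [pv_core n (Nat.sqrt n.toNat : ℤ) hn1 (Int.natCast_nonneg _) hsl hsu]
  exact (pv_alt_eq n hn1).symm
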